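-- pv_equiv track=rewrite | github.com/kongtaehun/CodingTestPrac | programmers/스택큐-기능개발.py | solution
-- ===== SOURCE A (Python) =====
-- from collections import deque
--
-- def solution(progresses, speeds):
--
--     result = []
--     progresses = deque(progresses)
--     speeds = deque(speeds)
--     day = 0
--     while True:
--         day+=1
--         setProgress(progresses,speeds,result)
--         if len(progresses)==0:
--             break
--     answer = result
--     return answer
--
-- def setProgress(progresses, speeds,result):
--     for i in range(len(progresses)):
--         progresses[i]+=speeds[i]
--     checkDone(progresses,speeds,result)
--
-- def checkDone(progresses,speeds,result):
--     #처음부터 100넘는거의 개수를 센다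
--     count = 0
--     for i in range(len(progresses)):
--         if progresses[i] >=100:
--             count+=1
--         else:
--             break
--     temp = 0
--     for i in range(count):
--         progresses.popleft()
--         speeds.popleft()
--         temp+=1
--     if temp>0:
--         result.append(temp)
-- ===== SOURCE B (Python) =====
-- def solution(progresses, speeds):
--     result = []
--     group = 0
--     release = 0
--     for p, s in zip(progresses, speeds):
--         d = -((p - 100) // s)
--         if d < 1:
--             d = 1
--         if d > release:
--             if group > 0:
--                 result.append(group)
--             group = 1
--             release = d
--         else:
--             group += 1
--     if group > 0:
--         result.append(group)
--     return result
-- ===== Notes on version B (the rewrite author's own statement) =====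
-- stated objective: faster
-- what changed: Replaces the day-by-day deque simulation (add speeds to every remaining task each day, pop finished prefix) by a closed-form ceiling-division finish day per task and a single pass that groups tasks by the running maximum finish day; intended as faster (O(n) vs O(n*days)) — in a timing run A timed out at n=16 on random inputs where B returned, so no clean ratio could be measured.
-- outside the precondition, e.g. on solution([150, 150], [-50, -10]): A returns [2], B returns [1, 1]; on solution([100], [0]): A returns [1], B raises ZeroDivisionError; on solution([1], []): A raises IndexError, B returns []
import Mathlib
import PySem

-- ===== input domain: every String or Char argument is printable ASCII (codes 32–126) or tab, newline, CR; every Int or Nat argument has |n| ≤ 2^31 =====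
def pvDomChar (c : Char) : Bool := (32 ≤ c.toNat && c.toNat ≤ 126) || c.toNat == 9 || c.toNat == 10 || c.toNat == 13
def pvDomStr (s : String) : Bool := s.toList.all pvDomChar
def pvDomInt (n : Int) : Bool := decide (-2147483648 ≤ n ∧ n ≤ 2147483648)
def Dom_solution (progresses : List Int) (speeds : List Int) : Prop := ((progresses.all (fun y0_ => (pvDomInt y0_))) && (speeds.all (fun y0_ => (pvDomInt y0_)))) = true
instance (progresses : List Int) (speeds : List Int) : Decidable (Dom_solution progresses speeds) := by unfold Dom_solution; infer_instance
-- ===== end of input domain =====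

-- B replaces A's day-by-day simulation by a per-task ceiling finish day and one grouping
-- pass by running maximum; intended as faster (a timing run saw A time out at n=16
-- where B returned; no clean ratio was measurable). A's while-loop is ported with a fuel
-- bound never reached on Pre_. Return-value equivalence only: A consumes its deques in place.

-- ===== PORT A =====
-- checkDone's first loop: count of the prefix with progress >= 100 (break at first below).
def checkCount : List Int → Nat
  | [] => 0
  | p :: rest => if p ≥ 100 then checkCount rest + 1 else 0

-- A's 'while True' loop: each iteration is setProgress + checkDone.  'zipWith (·+·)'
-- is exact when speeds is at least as long as progresses (Pre_; Python raises otherwise).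
-- Python has no fuel; on Pre_ the loop ends before the fuel does (proved below).
def loopA : Nat → List Int → List Int → List Int → List Int
  | 0, _, _, res => res
  | fuel+1, ps, ss, res =>
    let ps' := List.zipWith (· + ·) ps ss          -- setProgress
    let count := checkCount ps'                     -- checkDone: count prefix done
    let res' := if count > 0 then res ++ [(count : Int)] else res   -- temp>0: result.append
    let ps'' := ps'.drop count                      -- popleft count times
    let ss' := ss.drop count
    if ps''.isEmpty then res' else loopA fuel ps'' ss' res'

def solution (progresses : List Int) (speeds : List Int) : List Int :=
  loopA 8589934592 progresses speeds []

-- ===== PORT B =====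
-- d = -((p - 100) // s); if d < 1: d = 1
def finishDay (p s : Int) : Int :=
  let d := -(PySem.Int.floordiv (p - 100) s)
  if d < 1 then 1 else d

-- B's single pass: group, release, result accumulators as in Source B.
def loopB : List (Int × Int) → Int → Int → List Int → List Int
  | [], group, _, res => if group > 0 then res ++ [group] else res
  | x :: rest, group, release, res =>
    let d := finishDay x.1 x.2
    if d > release then
      loopB rest 1 d (if group > 0 then res ++ [group] else res)
    else
      loopB rest (group + 1) release res

def solution_alt (progresses : List Int) (speeds : List Int) : List Int :=
  loopB (progresses.zip speeds) 0 0 []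

-- ===== PRECONDITION & SPEC =====
-- Pre_ excludes inputs where speeds is shorter than progresses (A raises IndexError) and
-- inputs with a non-positive speed among the used ones: there A loops forever on typical
-- inputs, and where it does return its value depends on day-by-day regression of the
-- progress that a finish-day formula does not model (B may differ or raise ZeroDivisionError).
def Pre_solution (progresses : List Int) (speeds : List Int) : Prop :=
  progresses.length ≤ speeds.length ∧ ∀ x ∈ progresses.zip speeds, 1 ≤ x.2
instance (progresses : List Int) (speeds : List Int) : Decidable (Pre_solution progresses speeds) := by unfold Pre_solution; infer_instance

def pvWitness_solution : List Int × List Int := ([93, 30, 55], [1, 30, 5])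

def Spec_solution (progresses : List Int) (speeds : List Int) (out : List Int) : Prop := out = solution_alt progresses speeds
instance (progresses : List Int) (speeds : List Int) (out : List Int) : Decidable (Spec_solution progresses speeds out) := by unfold Spec_solution; infer_instance

-- ===== CLAIM (what is proved, stated in full; the proofs are below) =====
def Claim_equal_solution : Prop := ∀ (progresses : List Int) (speeds : List Int), Dom_solution progresses speeds → Pre_solution progresses speeds → Spec_solution progresses speeds (solution progresses speeds)

-- ===== LEMMAS AND PROOFS =====

-- pair-based version of loopA used only in the proofs
def loopA' : Nat → List (Int × Int) → List Int → List Int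
  | 0, _, res => res
  | fuel+1, L, res =>
    let L' := L.map (fun x => (x.1 + x.2, x.2))
    let count := checkCount (L'.map Prod.fst)
    let res' := if count > 0 then res ++ [(count : Int)] else res
    let L'' := L'.drop count
    if L''.isEmpty then res' else loopA' fuel L'' res'

def maxFinish : List (Int × Int) → Int
  | [] => 0
  | x :: rest => max (finishDay x.1 x.2) (maxFinish rest)

lemma finishDay_pos (p s : Int) : 1 ≤ finishDay p s := by
  unfold finishDay; dsimp only; split_ifs with h <;> omega

lemma finishDay_le_iff (p s t : Int) (hs : 1 ≤ s) (ht : 1 ≤ t) :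
    finishDay p s ≤ t ↔ 100 ≤ p + t * s := by
  have h := PySem.Int.le_floordiv_iff_mul_le (a := p - 100) (b := s) (q := -t) (by omega)
  unfold finishDay; dsimp only
  split_ifs with hd <;> constructor <;> intro hh <;> first
    | (have := h.mpr (by nlinarith); omega)
    | (have := h.mp (by omega); nlinarith)

lemma maxFinish_dropWhile (p : Int × Int → Bool) (L : List (Int × Int)) :
    maxFinish (L.dropWhile p) ≤ maxFinish L := by
  induction L with
  | nil => simp [List.dropWhile]
  | cons x r ih =>
    rw [List.dropWhile_cons]
    split_ifs with h
    · simp only [maxFinish]; omega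
    · simp only [maxFinish]; omega

lemma checkCount_takeWhile (t : Int) (ht : 1 ≤ t) :
    ∀ (L : List (Int × Int)), (∀ x ∈ L, 1 ≤ x.2) →
    checkCount (L.map (fun x => (x.1 + t * x.2, x.2)) |>.map Prod.fst)
      = (L.takeWhile (fun x => decide (finishDay x.1 x.2 ≤ t))).length := by
  intro L hL
  induction L with
  | nil => simp [checkCount]
  | cons x r ih =>
    have hs : 1 ≤ x.2 := hL x (by simp)
    have hiff := finishDay_le_iff x.1 x.2 t hs ht
    simp only [List.map_cons, checkCount, List.takeWhile_cons]
    by_cases h : finishDay x.1 x.2 ≤ t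
    · rw [if_pos (by omega), if_pos (by simpa using h)]
      rw [ih (fun y hy => hL y (List.mem_cons_of_mem _ hy))]
      simp
    · rw [if_neg (by omega), if_neg (by simpa using h)]
      simp

lemma dropWhile_head_false {α : Type} (p : α → Bool) (L : List α) (x : α) (r : List α)
    (h : L.dropWhile p = x :: r) : p x = false := by
  induction L with
  | nil => simp [List.dropWhile] at h
  | cons y ys ih =>
    rw [List.dropWhile_cons] at h
    split_ifs at h with hy
    · exact ih h
    · cases h; simpa using hy

lemma loopB_run : ∀ (run : List (Int × Int)) (rest : List (Int × Int)) (g rel : Int) (res : List Int),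
    1 ≤ g → (∀ x ∈ run, finishDay x.1 x.2 ≤ rel) →
    loopB (run ++ rest) g rel res = loopB rest (g + run.length) rel res := by
  intro run
  induction run with
  | nil => intro rest g rel res _ _; simp
  | cons x r ih =>
    intro rest g rel res hg hrun
    have hx : finishDay x.1 x.2 ≤ rel := hrun x (by simp)
    simp only [List.cons_append, loopB]
    rw [if_neg (by omega)]
    rw [ih rest (g + 1) rel res (by omega) (fun y hy => hrun y (List.mem_cons_of_mem _ hy))]
    congr 1
    simp only [List.length_cons]
    push_cast; ring

-- normal form of loopB at the start of a new group
lemma loopB_newgroup (x : Int × Int) (rest : List (Int × Int)) (rel : Int) (res : List Int)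
    (h : rel < finishDay x.1 x.2) :
    loopB (x :: rest) 0 rel res = loopB rest 1 (finishDay x.1 x.2) res := by
  simp only [loopB]
  rw [if_pos (by omega), if_neg (by omega)]

lemma loopB_close (x : Int × Int) (rest : List (Int × Int)) (rel : Int) (res : List Int)
    (g : Int) (h : rel < finishDay x.1 x.2) (hg : 1 ≤ g) :
    loopB (x :: rest) g rel res = loopB (x :: rest) 0 rel (res ++ [g]) := by
  simp only [loopB, if_pos (show finishDay x.1 x.2 > rel from h)]
  rw [if_pos (show g > 0 by omega), if_neg (show ¬((0:Int) > 0) by omega)]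

lemma sim : ∀ (fuel : Nat) (L : List (Int × Int)) (t : Int) (res : List Int),
    (∀ x ∈ L, 1 ≤ x.2) → 0 ≤ t → L ≠ [] →
    (∀ x r, L = x :: r → t < finishDay x.1 x.2) →
    maxFinish L - t ≤ (fuel : Int) →
    loopA' fuel (L.map (fun x => (x.1 + t * x.2, x.2))) res = loopB L 0 t res := by
  intro fuel
  induction fuel with
  | zero =>
    intro L t res hL ht hne hhead hfuel
    obtain ⟨x, r, rfl⟩ := List.exists_cons_of_ne_nil hne
    have := hhead x r rfl
    simp only [maxFinish] at hfuel
    omega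
  | succ f ih =>
    intro L t res hL ht hne hhead hfuel
    obtain ⟨x, r, rfl⟩ := List.exists_cons_of_ne_nil hne
    have hs : 1 ≤ x.2 := hL x (by simp)
    have hhx := hhead x r rfl
    have ht1 : (1:Int) ≤ t + 1 := by omega
    -- one day of A: stored values at day t+1
    have hmap : ((x :: r).map (fun y => (y.1 + t * y.2, y.2))).map (fun y => (y.1 + y.2, y.2))
        = (x :: r).map (fun y => (y.1 + (t+1) * y.2, y.2)) := by
      simp only [List.map_map]; apply List.map_congr_left; intro y _; simp; ring
    have hcount := checkCount_takeWhile (t+1) ht1 (x :: r) hL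
    simp only [loopA', hmap, hcount]
    set P : Int × Int → Bool := fun y => decide (finishDay y.1 y.2 ≤ t + 1) with hP
    by_cases hdone : finishDay x.1 x.2 ≤ t + 1
    · -- pop day: x's group finishes at day t+1
      have hfx : finishDay x.1 x.2 = t + 1 := by omega
      have hPx : P x = true := by simp [hP, hdone]
      have htw : (x :: r).takeWhile P = x :: r.takeWhile P := by
        rw [List.takeWhile_cons, if_pos hPx]
      set run := r.takeWhile P with hrun
      set rest := r.dropWhile P with hrest
      have hsplit : r = run ++ rest := (List.takeWhile_append_dropWhile).symm
      have hcnt : ((x :: r).takeWhile P).length = run.length + 1 := by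
        rw [htw]; simp
      -- A side: append count, drop, maybe recurse
      have hdrop : ((x :: r).map (fun y => (y.1 + (t+1) * y.2, y.2))).drop ((x :: r).takeWhile P).length
          = rest.map (fun y => (y.1 + (t+1) * y.2, y.2)) := by
        rw [hcnt]
        have : (x :: r).map (fun y => (y.1 + (t+1) * y.2, y.2))
            = (x :: run).map (fun y => (y.1 + (t+1) * y.2, y.2)) ++ rest.map (fun y => (y.1 + (t+1) * y.2, y.2)) := by
          rw [← List.map_append]; congr 1; rw [hsplit]; simp
        rw [this]
        have hlen : ((x :: run).map (fun y => (y.1 + (t+1) * y.2, y.2))).length = run.length + 1 := by simp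
        rw [← hlen, List.drop_left]
      rw [hcnt] at hdrop
      rw [hcnt, hdrop, if_pos (show run.length + 1 > 0 by omega)]
      -- B side
      have hBrun : ∀ y ∈ run, finishDay y.1 y.2 ≤ t + 1 := by
        intro y hy
        have := List.mem_takeWhile_imp hy
        simpa [hP] using this
      have hB : loopB (x :: r) 0 t res
          = loopB rest (1 + run.length) (t+1) res := by
        rw [loopB_newgroup x r t res hhx, hfx]
        have hr : r = run ++ rest := hsplit
        rw [hr, loopB_run run rest 1 (t+1) res (by omega) hBrun]
      rw [hB]
      have hresB : ((run.length + 1 : Nat) : Int) = 1 + (run.length : Int) := by push_cast; ring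
      rcases heq : rest with _ | ⟨y, rest'⟩
      · -- everything popped
        simp only [List.map_nil, List.isEmpty_nil, if_pos, loopB]
        rw [if_pos (show (1 : Int) + run.length > 0 by omega), hresB]
      · -- rest nonempty: its head is not yet done at day t+1
        have hy : P y = false := dropWhile_head_false P r y rest' (by rw [← hrest, heq])
        have hyd : t + 1 < finishDay y.1 y.2 := by
          by_contra hc; simp [hP] at hy; omega
        have hrestmem : ∀ z ∈ rest, 1 ≤ z.2 := by
          intro z hz
          refine hL z ?_
          rw [hsplit]
          exact List.mem_cons_of_mem _ (List.mem_append_right _ hz)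
        have hfuel' : maxFinish rest - (t+1) ≤ (f : Int) := by
          have h1 : maxFinish rest ≤ maxFinish r := by rw [hrest]; exact maxFinish_dropWhile P r
          have h2 : maxFinish r ≤ maxFinish (x :: r) := by simp only [maxFinish]; omega
          push_cast at hfuel ⊢; omega
        rw [heq] at hrestmem hfuel'
        have hIH := ih (y :: rest') (t+1) (res ++ [((run.length + 1 : Nat) : Int)]) hrestmem (by omega) (by simp)
          (by intro z w hzw; cases hzw; exact hyd) hfuel'
        rw [show ((List.map (fun z => (z.1 + (t+1) * z.2, z.2)) (y :: rest')).isEmpty) = false from by simp]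
        simp only [if_neg Bool.false_ne_true]
        rw [hIH, hresB]
        exact (loopB_close y rest' (t+1) res (1 + (run.length : Int)) hyd (by omega)).symm
    · -- idle day: nothing done, t advances
      have hPx : P x = false := by simp [hP]; omega
      have htw0 : ((x :: r).takeWhile P).length = 0 := by
        rw [List.takeWhile_cons, if_neg (by simp [hPx])]; simp
      rw [htw0]
      simp only [List.drop_zero]
      rw [if_neg (show ¬(0 > 0) from by omega)]
      have hnonempty : (((x :: r).map (fun y => (y.1 + (t+1) * y.2, y.2))).isEmpty) = false := by simp
      rw [hnonempty]
      simp only [if_neg Bool.false_ne_true]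
      have hfuel' : maxFinish (x :: r) - (t+1) ≤ (f : Int) := by
        have : t + 1 < maxFinish (x :: r) := by
          simp only [maxFinish]; omega
        push_cast at hfuel ⊢; omega
      have hIH := ih (x :: r) (t+1) res hL (by omega) (by simp)
        (by intro z w hzw; cases hzw; omega) hfuel'
      rw [hIH]
      rw [loopB_newgroup x r t res hhx, loopB_newgroup x r (t+1) res (by omega)]

-- loopA on the two lists equals loopA' on the zip
lemma zipWith_add_eq_map_zip : ∀ (ps ss : List Int),
    List.zipWith (· + ·) ps ss = (ps.zip ss).map (fun x => x.1 + x.2) := by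
  intro ps
  induction ps with
  | nil => intro ss; simp
  | cons p pr ih =>
    intro ss
    cases ss with
    | nil => simp
    | cons s sr => simp [ih]

lemma zip_step : ∀ (ps ss : List Int), ps.length ≤ ss.length →
    (List.zipWith (· + ·) ps ss).zip ss = (ps.zip ss).map (fun x => (x.1 + x.2, x.2)) := by
  intro ps
  induction ps with
  | nil => intro ss _; simp
  | cons p pr ih =>
    intro ss hlen
    cases ss with
    | nil => simp at hlen
    | cons s sr =>
      simp only [List.zipWith_cons_cons, List.zip_cons_cons, List.map_cons]
      rw [ih sr (by simpa using hlen)]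

lemma zip_drop : ∀ (n : Nat) (ps ss : List Int), (ps.drop n).zip (ss.drop n) = (ps.zip ss).drop n := by
  intro n
  induction n with
  | zero => simp
  | succ m ih =>
    intro ps ss
    cases ps with
    | nil => simp
    | cons p pr =>
      cases ss with
      | nil => simp
      | cons s sr => simpa using ih pr sr

lemma loopA_eq_loopA' : ∀ (fuel : Nat) (ps ss : List Int) (res : List Int),
    ps.length ≤ ss.length →
    loopA fuel ps ss res = loopA' fuel (ps.zip ss) res := by
  intro fuel
  induction fuel with
  | zero => intro ps ss res _; rfl
  | succ f ih =>
    intro ps ss res hlen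
    simp only [loopA, loopA']
    have hfst : ((ps.zip ss).map (fun x => (x.1 + x.2, x.2))).map Prod.fst
        = List.zipWith (· + ·) ps ss := by
      rw [zipWith_add_eq_map_zip]; simp [List.map_map]
    rw [hfst]
    set c := checkCount (List.zipWith (· + ·) ps ss) with hc
    have hdrop : ((ps.zip ss).map (fun x => (x.1 + x.2, x.2))).drop c
        = ((List.zipWith (· + ·) ps ss).drop c).zip (ss.drop c) := by
      rw [← zip_step ps ss hlen, ← zip_drop]
    rw [hdrop]
    have hlen' : ((List.zipWith (· + ·) ps ss).drop c).length ≤ (ss.drop c).length := by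
      simp; omega
    have hemp : (((List.zipWith (· + ·) ps ss).drop c).zip (ss.drop c)).isEmpty
        = ((List.zipWith (· + ·) ps ss).drop c).isEmpty := by
      rcases heq : (List.zipWith (· + ·) ps ss).drop c with _ | ⟨a, b⟩
      · simp
      · rcases heq2 : ss.drop c with _ | ⟨u, v⟩
        · exfalso
          have := hlen'
          rw [heq, heq2] at this; simp at this
        · simp
    rw [hemp]
    split_ifs with h1 h2 h3 <;> first | rfl | exact ih _ _ _ hlen'

-- finish day is below the fuel bound on Dom
lemma finishDay_le_fuel (p s : Int) (hp : -2147483648 ≤ p) (hs : 1 ≤ s) :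
    finishDay p s ≤ 8589934592 := by
  rw [finishDay_le_iff p s 8589934592 hs (by omega)]
  nlinarith

lemma maxFinish_le_fuel (L : List (Int × Int))
    (hdom : ∀ x ∈ L, -2147483648 ≤ x.1) (hs : ∀ x ∈ L, 1 ≤ x.2) :
    maxFinish L ≤ 8589934592 := by
  induction L with
  | nil => simp [maxFinish]
  | cons x r ih =>
    have h1 := finishDay_le_fuel x.1 x.2 (hdom x (by simp)) (hs x (by simp))
    have h2 := ih (fun y hy => hdom y (List.mem_cons_of_mem _ hy))
      (fun y hy => hs y (List.mem_cons_of_mem _ hy))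
    simp only [maxFinish]; omega

lemma fuel_succ : (8589934592 : Nat) = 8589934591 + 1 := by norm_num

-- ===== VERDICT (by name: the statement is the Claim_ definition above) =====
theorem solution_spec : Claim_equal_solution := by
  intro progresses speeds hdom hpre
  obtain ⟨hlen, hsp⟩ := hpre
  unfold Spec_solution solution solution_alt
  rw [loopA_eq_loopA' _ _ _ _ hlen]
  rcases heq : progresses.zip speeds with _ | ⟨x, r⟩
  · -- empty: one iteration of A's loop, break with []
    have hps : progresses = [] := by
      cases progresses with
      | nil => rfl
      | cons p pr =>
        cases speeds with
        | nil => simp at hlen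
        | cons s sr => simp at heq
    subst hps
    rw [fuel_succ]
    simp [loopA', loopB, checkCount]
  · have hxr : ∀ y ∈ x :: r, y ∈ progresses.zip speeds := by rw [heq]; intro y hy; exact hy
    have hdom1 : ∀ y ∈ x :: r, -2147483648 ≤ y.1 := by
      intro y hy
      have hmem := List.of_mem_zip (hxr y hy)
      unfold Dom_solution at hdom
      simp only [Bool.and_eq_true, List.all_eq_true] at hdom
      have := hdom.1 y.1 hmem.1
      simp [pvDomInt] at this
      omega
    have hsp1 : ∀ y ∈ x :: r, 1 ≤ y.2 := by
      intro y hy; exact hsp y (hxr y hy)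
    have hfuel : maxFinish (x :: r) - 0 ≤ ((8589934592 : Nat) : Int) := by
      have := maxFinish_le_fuel (x :: r) hdom1 hsp1
      push_cast; omega
    have hmap0 : (x :: r).map (fun y => (y.1 + (0:Int) * y.2, y.2)) = x :: r := by
      simp
    have := sim 8589934592 (x :: r) 0 [] hsp1 (by omega) (by simp)
      (by intro z w hzw; cases hzw; have := finishDay_pos x.1 x.2; omega) hfuel
    rw [hmap0] at this
    exact this
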